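-- pv_equiv track=rewrite | github.com/zhongjk1988/siXingTool | wuxingTool/untilTool.py | isTongMa
-- ===== SOURCE A (Python) =====
-- def isTongMa(ertongyishsang_boot,qian,bai,shi,ge):
--     list = []
--     list.append(qian)
--     list.append(bai)
--     list.append(shi)
--     list.append(ge)
--
--     for data in list:
--         num = list.count(data)
--         if ertongyishsang_boot:
--             if(num >=2):
--                 return True
--         else:
--             if(num >=3):
--                 return True
--     return False
-- ===== SOURCE B (Python) =====
-- def isTongMa(ertongyishsang_boot, qian, bai, shi, ge):
--     # Closed-form over the fixed arity 4: no list, no loop, no counting.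
--     if ertongyishsang_boot:
--         # some value occurs at least twice  <=>  some of the 6 pairs is equal
--         return (qian == bai or qian == shi or qian == ge
--                 or bai == shi or bai == ge or shi == ge)
--     # some value occurs at least three times  <=>  some index triple is all-equal
--     return ((qian == bai and qian == shi) or (qian == bai and qian == ge)
--             or (qian == shi and qian == ge) or (bai == shi and bai == ge))
-- ===== Notes on version B (the rewrite author's own statement) =====
-- stated objective: simpler
-- what changed: B drops the list and the counting loop entirely: for the fixed arity of four values it decides the result by a closed-form boolean formula - a disjunction over the 6 pairwise equalities (flag set) or over the 4 all-equal index triples (flag clear).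
import Mathlib
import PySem

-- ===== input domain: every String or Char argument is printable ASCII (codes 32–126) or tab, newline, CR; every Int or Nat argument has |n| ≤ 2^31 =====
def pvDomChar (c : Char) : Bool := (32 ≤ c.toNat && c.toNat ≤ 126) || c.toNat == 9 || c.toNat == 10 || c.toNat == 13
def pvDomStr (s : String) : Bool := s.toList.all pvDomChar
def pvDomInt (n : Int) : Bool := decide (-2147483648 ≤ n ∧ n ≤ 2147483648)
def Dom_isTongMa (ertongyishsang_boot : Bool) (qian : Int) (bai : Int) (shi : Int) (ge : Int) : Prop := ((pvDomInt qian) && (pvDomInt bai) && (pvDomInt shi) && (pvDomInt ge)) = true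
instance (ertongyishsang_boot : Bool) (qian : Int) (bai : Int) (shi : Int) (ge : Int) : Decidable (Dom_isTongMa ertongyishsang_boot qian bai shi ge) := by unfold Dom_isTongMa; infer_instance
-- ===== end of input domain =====

-- B replaces A's list-building and counting loop by a loop-free closed-form boolean formula over the fixed four arguments (simpler).

-- ===== PORT A =====
-- the 'for data in list' loop: scans lst, rescanning the full list with .count for each element
def tongLoop (ertongyishsang_boot : Bool) (lst : List Int) : List Int → Bool
  | [] => false
  | d :: rest =>
    let num : Int := PySem.List.count lst d
    if ertongyishsang_boot then
      (if num ≥ 2 then true else tongLoop ertongyishsang_boot lst rest)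
    else
      (if num ≥ 3 then true else tongLoop ertongyishsang_boot lst rest)

def isTongMa (ertongyishsang_boot : Bool) (qian : Int) (bai : Int) (shi : Int) (ge : Int) : Bool :=
  let lst : List Int := [qian, bai, shi, ge]
  tongLoop ertongyishsang_boot lst lst

-- ===== PORT B =====
def isTongMa_alt (ertongyishsang_boot : Bool) (qian : Int) (bai : Int) (shi : Int) (ge : Int) : Bool :=
  if ertongyishsang_boot then
    -- some value occurs at least twice <=> one of the 6 pairs is equal
    (qian == bai || qian == shi || qian == ge || bai == shi || bai == ge || shi == ge)
  else
    -- some value occurs at least three times <=> some index triple is all-equal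
    ((qian == bai && qian == shi) || (qian == bai && qian == ge)
      || (qian == shi && qian == ge) || (bai == shi && bai == ge))

-- ===== PRECONDITION & SPEC =====
def Spec_isTongMa (ertongyishsang_boot : Bool) (qian : Int) (bai : Int) (shi : Int) (ge : Int) (out : Bool) : Prop := out = isTongMa_alt ertongyishsang_boot qian bai shi ge
instance (ertongyishsang_boot : Bool) (qian : Int) (bai : Int) (shi : Int) (ge : Int) (out : Bool) : Decidable (Spec_isTongMa ertongyishsang_boot qian bai shi ge out) := by unfold Spec_isTongMa; infer_instance

-- ===== CLAIM =====
def Claim_equal_isTongMa : Prop := ∀ (ertongyishsang_boot : Bool) (qian : Int) (bai : Int) (shi : Int) (ge : Int), Dom_isTongMa ertongyishsang_boot qian bai shi ge → Spec_isTongMa ertongyishsang_boot qian bai shi ge (isTongMa ertongyishsang_boot qian bai shi ge)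

-- ===== LEMMAS AND PROOFS =====

-- ===== VERDICT =====
theorem isTongMa_spec : Claim_equal_isTongMa := by
  intro b q w s g _
  unfold Spec_isTongMa
  by_cases h1 : q = w <;> by_cases h2 : q = s <;> by_cases h3 : q = g <;>
    by_cases h4 : w = s <;> by_cases h5 : w = g <;> by_cases h6 : s = g <;>
    cases b <;>
    simp_all [isTongMa, isTongMa_alt, tongLoop, PySem.List.count,
      List.count, List.countP_cons, List.countP_nil, beq_iff_eq] <;>
    (try (split_ifs <;> simp_all))
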